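-- pv_equiv track=rewrite | github.com/dustball62/Seplos3MQTT_include__PIB_PIC | seplos3mqtt.py | calcCRC16
-- ===== SOURCE A (Python) =====
-- def calcCRC16(data, size):
--     crcHi = 0xFF
--     crcLo = 0xFF
--
--     crcHiTable = [
--         0x00, 0xC1, 0x81, 0x40, 0x01, 0xC0, 0x80, 0x41, 0x01, 0xC0,
--         0x80, 0x41, 0x00, 0xC1, 0x81, 0x40, 0x01, 0xC0, 0x80, 0x41,
--         0x00, 0xC1, 0x81, 0x40, 0x00, 0xC1, 0x81, 0x40, 0x01, 0xC0,
--         0x80, 0x41, 0x01, 0xC0, 0x80, 0x41, 0x00, 0xC1, 0x81, 0x40,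
--         0x00, 0xC1, 0x81, 0x40, 0x01, 0xC0, 0x80, 0x41, 0x00, 0xC1,
--         0x81, 0x40, 0x01, 0xC0, 0x80, 0x41, 0x01, 0xC0, 0x80, 0x41,
--         0x00, 0xC1, 0x81, 0x40, 0x01, 0xC0, 0x80, 0x41, 0x00, 0xC1,
--         0x81, 0x40, 0x00, 0xC1, 0x81, 0x40, 0x01, 0xC0, 0x80, 0x41,
--         0x00, 0xC1, 0x81, 0x40, 0x01, 0xC0, 0x80, 0x41, 0x01, 0xC0,
--         0x80, 0x41, 0x00, 0xC1, 0x81, 0x40, 0x00, 0xC1, 0x81, 0x40,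
--         0x01, 0xC0, 0x80, 0x41, 0x01, 0xC0, 0x80, 0x41, 0x00, 0xC1,
--         0x81, 0x40, 0x01, 0xC0, 0x80, 0x41, 0x00, 0xC1, 0x81, 0x40,
--         0x00, 0xC1, 0x81, 0x40, 0x01, 0xC0, 0x80, 0x41, 0x01, 0xC0,
--         0x80, 0x41, 0x00, 0xC1, 0x81, 0x40, 0x00, 0xC1, 0x81, 0x40,
--         0x01, 0xC0, 0x80, 0x41, 0x00, 0xC1, 0x81, 0x40, 0x01, 0xC0,
--         0x80, 0x41, 0x01, 0xC0, 0x80, 0x41, 0x00, 0xC1, 0x81, 0x40,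
--         0x00, 0xC1, 0x81, 0x40, 0x01, 0xC0, 0x80, 0x41, 0x01, 0xC0,
--         0x80, 0x41, 0x00, 0xC1, 0x81, 0x40, 0x01, 0xC0, 0x80, 0x41,
--         0x00, 0xC1, 0x81, 0x40, 0x00, 0xC1, 0x81, 0x40, 0x01, 0xC0,
--         0x80, 0x41, 0x00, 0xC1, 0x81, 0x40, 0x01, 0xC0, 0x80, 0x41,
--         0x01, 0xC0, 0x80, 0x41, 0x00, 0xC1, 0x81, 0x40, 0x01, 0xC0,
--         0x80, 0x41, 0x00, 0xC1, 0x81, 0x40, 0x00, 0xC1, 0x81, 0x40,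
--         0x01, 0xC0, 0x80, 0x41, 0x01, 0xC0, 0x80, 0x41, 0x00, 0xC1,
--         0x81, 0x40, 0x00, 0xC1, 0x81, 0x40, 0x01, 0xC0, 0x80, 0x41,
--         0x00, 0xC1, 0x81, 0x40, 0x01, 0xC0, 0x80, 0x41, 0x01, 0xC0,
--         0x80, 0x41, 0x00, 0xC1, 0x81, 0x40]
--
--     crcLoTable = [
--         0x00, 0xC0, 0xC1, 0x01, 0xC3, 0x03, 0x02, 0xC2, 0xC6, 0x06,
--         0x07, 0xC7, 0x05, 0xC5, 0xC4, 0x04, 0xCC, 0x0C, 0x0D, 0xCD,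
--         0x0F, 0xCF, 0xCE, 0x0E, 0x0A, 0xCA, 0xCB, 0x0B, 0xC9, 0x09,
--         0x08, 0xC8, 0xD8, 0x18, 0x19, 0xD9, 0x1B, 0xDB, 0xDA, 0x1A,
--         0x1E, 0xDE, 0xDF, 0x1F, 0xDD, 0x1D, 0x1C, 0xDC, 0x14, 0xD4,
--         0xD5, 0x15, 0xD7, 0x17, 0x16, 0xD6, 0xD2, 0x12, 0x13, 0xD3,
--         0x11, 0xD1, 0xD0, 0x10, 0xF0, 0x30, 0x31, 0xF1, 0x33, 0xF3,
--         0xF2, 0x32, 0x36, 0xF6, 0xF7, 0x37, 0xF5, 0x35, 0x34, 0xF4,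
--         0x3C, 0xFC, 0xFD, 0x3D, 0xFF, 0x3F, 0x3E, 0xFE, 0xFA, 0x3A,
--         0x3B, 0xFB, 0x39, 0xF9, 0xF8, 0x38, 0x28, 0xE8, 0xE9, 0x29,
--         0xEB, 0x2B, 0x2A, 0xEA, 0xEE, 0x2E, 0x2F, 0xEF, 0x2D, 0xED,
--         0xEC, 0x2C, 0xE4, 0x24, 0x25, 0xE5, 0x27, 0xE7, 0xE6, 0x26,
--         0x22, 0xE2, 0xE3, 0x23, 0xE1, 0x21, 0x20, 0xE0, 0xA0, 0x60,
--         0x61, 0xA1, 0x63, 0xA3, 0xA2, 0x62, 0x66, 0xA6, 0xA7, 0x67,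
--         0xA5, 0x65, 0x64, 0xA4, 0x6C, 0xAC, 0xAD, 0x6D, 0xAF, 0x6F,
--         0x6E, 0xAE, 0xAA, 0x6A, 0x6B, 0xAB, 0x69, 0xA9, 0xA8, 0x68,
--         0x78, 0xB8, 0xB9, 0x79, 0xBB, 0x7B, 0x7A, 0xBA, 0xBE, 0x7E,
--         0x7F, 0xBF, 0x7D, 0xBD, 0xBC, 0x7C, 0xB4, 0x74, 0x75, 0xB5,
--         0x77, 0xB7, 0xB6, 0x76, 0x72, 0xB2, 0xB3, 0x73, 0xB1, 0x71,
--         0x70, 0xB0, 0x50, 0x90, 0x91, 0x51, 0x93, 0x53, 0x52, 0x92,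
--         0x96, 0x56, 0x57, 0x97, 0x55, 0x95, 0x94, 0x54, 0x9C, 0x5C,
--         0x5D, 0x9D, 0x5F, 0x9F, 0x9E, 0x5E, 0x5A, 0x9A, 0x9B, 0x5B,
--         0x99, 0x59, 0x58, 0x98, 0x88, 0x48, 0x49, 0x89, 0x4B, 0x8B,
--         0x8A, 0x4A, 0x4E, 0x8E, 0x8F, 0x4F, 0x8D, 0x4D, 0x4C, 0x8C,
--         0x44, 0x84, 0x85, 0x45, 0x87, 0x47, 0x46, 0x86, 0x82, 0x42,
--         0x43, 0x83, 0x41, 0x81, 0x80, 0x40]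
--
--     index = 0
--     while index < size:
--         crc = crcHi ^ data[index]
--         crcHi = crcLo ^ crcHiTable[crc]
--         crcLo = crcLoTable[crc]
--         index += 1
--
--     return (crcHi * 0x0100) + crcLo
-- ===== SOURCE B (Python) =====
-- def calcCRC16(data, size):
--     crc = 0xFFFF
--     index = 0
--     while index < size:
--         crc ^= data[index]
--         for _ in range(8):
--             if crc & 1:
--                 crc = (crc >> 1) ^ 0xA001
--             else:
--                 crc >>= 1
--         index += 1
--     return ((crc & 0xFF) << 8) | (crc >> 8)
-- ===== Notes on version B (the rewrite author's own statement) =====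
-- stated objective: simpler
-- what changed: Replaces the two 256-entry hi/lo lookup tables and the split crcHi/crcLo byte state by the standard bit-by-bit Modbus CRC16: one 16-bit accumulator, xor the byte in, then 8 shift/conditional-xor-0xA001 steps, byte-swapping the result on return.
-- outside the precondition, e.g. on calcCRC16([-1], 1): A returns 65280, B returns -1
import Mathlib
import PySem

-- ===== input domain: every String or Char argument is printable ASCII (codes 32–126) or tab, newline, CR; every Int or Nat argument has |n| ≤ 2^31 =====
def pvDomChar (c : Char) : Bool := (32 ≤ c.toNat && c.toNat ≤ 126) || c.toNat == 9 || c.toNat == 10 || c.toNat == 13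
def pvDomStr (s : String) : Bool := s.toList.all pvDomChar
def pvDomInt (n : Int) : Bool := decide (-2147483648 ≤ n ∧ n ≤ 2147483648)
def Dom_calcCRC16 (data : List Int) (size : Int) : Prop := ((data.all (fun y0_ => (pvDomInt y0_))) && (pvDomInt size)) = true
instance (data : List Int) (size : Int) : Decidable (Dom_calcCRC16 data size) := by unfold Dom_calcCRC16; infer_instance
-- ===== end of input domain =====

-- B replaces A's two 256-entry lookup tables by the standard bit-by-bit Modbus CRC16
-- (one 16-bit accumulator, 8 shift/xor steps per byte); same return value on Pre_.

-- ===== PORT A =====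
def crcHiTable : List Int := [
  0x00, 0xC1, 0x81, 0x40, 0x01, 0xC0, 0x80, 0x41, 0x01, 0xC0, 0x80, 0x41, 0x00, 0xC1, 0x81, 0x40,
  0x01, 0xC0, 0x80, 0x41, 0x00, 0xC1, 0x81, 0x40, 0x00, 0xC1, 0x81, 0x40, 0x01, 0xC0, 0x80, 0x41,
  0x01, 0xC0, 0x80, 0x41, 0x00, 0xC1, 0x81, 0x40, 0x00, 0xC1, 0x81, 0x40, 0x01, 0xC0, 0x80, 0x41,
  0x00, 0xC1, 0x81, 0x40, 0x01, 0xC0, 0x80, 0x41, 0x01, 0xC0, 0x80, 0x41, 0x00, 0xC1, 0x81, 0x40,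
  0x01, 0xC0, 0x80, 0x41, 0x00, 0xC1, 0x81, 0x40, 0x00, 0xC1, 0x81, 0x40, 0x01, 0xC0, 0x80, 0x41,
  0x00, 0xC1, 0x81, 0x40, 0x01, 0xC0, 0x80, 0x41, 0x01, 0xC0, 0x80, 0x41, 0x00, 0xC1, 0x81, 0x40,
  0x00, 0xC1, 0x81, 0x40, 0x01, 0xC0, 0x80, 0x41, 0x01, 0xC0, 0x80, 0x41, 0x00, 0xC1, 0x81, 0x40,
  0x01, 0xC0, 0x80, 0x41, 0x00, 0xC1, 0x81, 0x40, 0x00, 0xC1, 0x81, 0x40, 0x01, 0xC0, 0x80, 0x41,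
  0x01, 0xC0, 0x80, 0x41, 0x00, 0xC1, 0x81, 0x40, 0x00, 0xC1, 0x81, 0x40, 0x01, 0xC0, 0x80, 0x41,
  0x00, 0xC1, 0x81, 0x40, 0x01, 0xC0, 0x80, 0x41, 0x01, 0xC0, 0x80, 0x41, 0x00, 0xC1, 0x81, 0x40,
  0x00, 0xC1, 0x81, 0x40, 0x01, 0xC0, 0x80, 0x41, 0x01, 0xC0, 0x80, 0x41, 0x00, 0xC1, 0x81, 0x40,
  0x01, 0xC0, 0x80, 0x41, 0x00, 0xC1, 0x81, 0x40, 0x00, 0xC1, 0x81, 0x40, 0x01, 0xC0, 0x80, 0x41,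
  0x00, 0xC1, 0x81, 0x40, 0x01, 0xC0, 0x80, 0x41, 0x01, 0xC0, 0x80, 0x41, 0x00, 0xC1, 0x81, 0x40,
  0x01, 0xC0, 0x80, 0x41, 0x00, 0xC1, 0x81, 0x40, 0x00, 0xC1, 0x81, 0x40, 0x01, 0xC0, 0x80, 0x41,
  0x01, 0xC0, 0x80, 0x41, 0x00, 0xC1, 0x81, 0x40, 0x00, 0xC1, 0x81, 0x40, 0x01, 0xC0, 0x80, 0x41,
  0x00, 0xC1, 0x81, 0x40, 0x01, 0xC0, 0x80, 0x41, 0x01, 0xC0, 0x80, 0x41, 0x00, 0xC1, 0x81, 0x40]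

def crcLoTable : List Int := [
  0x00, 0xC0, 0xC1, 0x01, 0xC3, 0x03, 0x02, 0xC2, 0xC6, 0x06, 0x07, 0xC7, 0x05, 0xC5, 0xC4, 0x04,
  0xCC, 0x0C, 0x0D, 0xCD, 0x0F, 0xCF, 0xCE, 0x0E, 0x0A, 0xCA, 0xCB, 0x0B, 0xC9, 0x09, 0x08, 0xC8,
  0xD8, 0x18, 0x19, 0xD9, 0x1B, 0xDB, 0xDA, 0x1A, 0x1E, 0xDE, 0xDF, 0x1F, 0xDD, 0x1D, 0x1C, 0xDC,
  0x14, 0xD4, 0xD5, 0x15, 0xD7, 0x17, 0x16, 0xD6, 0xD2, 0x12, 0x13, 0xD3, 0x11, 0xD1, 0xD0, 0x10,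
  0xF0, 0x30, 0x31, 0xF1, 0x33, 0xF3, 0xF2, 0x32, 0x36, 0xF6, 0xF7, 0x37, 0xF5, 0x35, 0x34, 0xF4,
  0x3C, 0xFC, 0xFD, 0x3D, 0xFF, 0x3F, 0x3E, 0xFE, 0xFA, 0x3A, 0x3B, 0xFB, 0x39, 0xF9, 0xF8, 0x38,
  0x28, 0xE8, 0xE9, 0x29, 0xEB, 0x2B, 0x2A, 0xEA, 0xEE, 0x2E, 0x2F, 0xEF, 0x2D, 0xED, 0xEC, 0x2C,
  0xE4, 0x24, 0x25, 0xE5, 0x27, 0xE7, 0xE6, 0x26, 0x22, 0xE2, 0xE3, 0x23, 0xE1, 0x21, 0x20, 0xE0,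
  0xA0, 0x60, 0x61, 0xA1, 0x63, 0xA3, 0xA2, 0x62, 0x66, 0xA6, 0xA7, 0x67, 0xA5, 0x65, 0x64, 0xA4,
  0x6C, 0xAC, 0xAD, 0x6D, 0xAF, 0x6F, 0x6E, 0xAE, 0xAA, 0x6A, 0x6B, 0xAB, 0x69, 0xA9, 0xA8, 0x68,
  0x78, 0xB8, 0xB9, 0x79, 0xBB, 0x7B, 0x7A, 0xBA, 0xBE, 0x7E, 0x7F, 0xBF, 0x7D, 0xBD, 0xBC, 0x7C,
  0xB4, 0x74, 0x75, 0xB5, 0x77, 0xB7, 0xB6, 0x76, 0x72, 0xB2, 0xB3, 0x73, 0xB1, 0x71, 0x70, 0xB0,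
  0x50, 0x90, 0x91, 0x51, 0x93, 0x53, 0x52, 0x92, 0x96, 0x56, 0x57, 0x97, 0x55, 0x95, 0x94, 0x54,
  0x9C, 0x5C, 0x5D, 0x9D, 0x5F, 0x9F, 0x9E, 0x5E, 0x5A, 0x9A, 0x9B, 0x5B, 0x99, 0x59, 0x58, 0x98,
  0x88, 0x48, 0x49, 0x89, 0x4B, 0x8B, 0x8A, 0x4A, 0x4E, 0x8E, 0x8F, 0x4F, 0x8D, 0x4D, 0x4C, 0x8C,
  0x44, 0x84, 0x85, 0x45, 0x87, 0x47, 0x46, 0x86, 0x82, 0x42, 0x43, 0x83, 0x41, 0x81, 0x80, 0x40]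

def calcCRC16Loop (data : List Int) (size index crcHi crcLo : Int) : Int :=
  if _h : index < size then
    let crc := PySem.Int.bxor crcHi ((PySem.List.pyGet? data index).getD 0)
    calcCRC16Loop data size (index + 1)
      (PySem.Int.bxor crcLo ((PySem.List.pyGet? crcHiTable crc).getD 0))
      ((PySem.List.pyGet? crcLoTable crc).getD 0)
  else
    crcHi * 0x0100 + crcLo
termination_by (size - index).toNat
decreasing_by omega

def calcCRC16 (data : List Int) (size : Int) : Int :=
  calcCRC16Loop data size 0 0xFF 0xFF

-- ===== PORT B =====
-- one inner bit step: if crc & 1: crc = (crc >> 1) ^ 0xA001 else crc >>= 1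
def bitStep (crc : Int) : Int :=
  if PySem.Int.band crc 1 = 1 then PySem.Int.bxor (crc >>> (1 : Nat)) 0xA001 else crc >>> (1 : Nat)

def calcCRC16AltLoop (data : List Int) (size index crc : Int) : Int :=
  if _h : index < size then
    calcCRC16AltLoop data size (index + 1)
      ((List.range 8).foldl (fun c _ => bitStep c)
        (PySem.Int.bxor crc ((PySem.List.pyGet? data index).getD 0)))
  else
    PySem.Int.bor ((PySem.Int.band crc 0xFF) <<< (8 : Nat)) (crc >>> (8 : Nat))
termination_by (size - index).toNat
decreasing_by omega

def calcCRC16_alt (data : List Int) (size : Int) : Int :=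
  calcCRC16AltLoop data size 0 0xFFFF

-- ===== PRECONDITION & SPEC =====
-- Pre_ excludes inputs where A raises (size > len(data), or a processed entry outside 0..255 making
-- the table index out of range) and the accidental cases where a negative entry still returns via
-- Python's negative-index wraparound into the tables.
def Pre_calcCRC16 (data : List Int) (size : Int) : Prop :=
  size ≤ (data.length : Int) ∧ ∀ x ∈ data.take size.toNat, 0 ≤ x ∧ x < 256

instance (data : List Int) (size : Int) : Decidable (Pre_calcCRC16 data size) := by
  unfold Pre_calcCRC16; infer_instance

def pvWitness_calcCRC16 : List Int × Int := ([1, 2, 250], 3)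

def Spec_calcCRC16 (data : List Int) (size : Int) (out : Int) : Prop := out = calcCRC16_alt data size
instance (data : List Int) (size : Int) (out : Int) : Decidable (Spec_calcCRC16 data size out) := by unfold Spec_calcCRC16; infer_instance

-- ===== CLAIM (what is proved, stated in full; the proofs are below) =====
def Claim_equal_calcCRC16 : Prop := ∀ (data : List Int) (size : Int), Dom_calcCRC16 data size → Pre_calcCRC16 data size → Spec_calcCRC16 data size (calcCRC16 data size)

-- ===== LEMMAS AND PROOFS =====

-- Nat model of one bit step of B
def bstepN (c : Nat) : Nat := if c &&& 1 = 1 then (c >>> 1) ^^^ 0xA001 else c >>> 1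

lemma bstepN_xor_shift (x y k : Nat) : bstepN (x ^^^ (y <<< (k+1))) = bstepN x ^^^ (y <<< k) := by
  have hev : (y <<< (k+1)) &&& 1 = 0 := by
    rw [Nat.shiftLeft_succ, Nat.and_one_is_mod]; omega
  have hpar : (x ^^^ (y <<< (k+1))) &&& 1 = x &&& 1 := by
    rw [Nat.and_xor_distrib_right, hev, Nat.xor_zero]
  have hsh : (x ^^^ (y <<< (k+1))) >>> 1 = (x >>> 1) ^^^ (y <<< k) := by
    rw [Nat.shiftRight_xor_distrib]
    congr 1
    rw [Nat.shiftLeft_succ, Nat.shiftRight_one, Nat.mul_div_cancel_left _ (by norm_num)]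
  unfold bstepN
  rw [hpar, hsh]
  split_ifs with h
  · rw [Nat.xor_assoc, Nat.xor_assoc, Nat.xor_comm (y <<< k)]
  · rfl

lemma iter_bstepN_xor_shift (n x y : Nat) : bstepN^[n] (x ^^^ (y <<< n)) = bstepN^[n] x ^^^ y := by
  induction n generalizing x with
  | zero => simp
  | succ n ih =>
      rw [Function.iterate_succ_apply, Function.iterate_succ_apply, bstepN_xor_shift, ih]

lemma low_byte (h l : Nat) (hh : h < 256) : (h ^^^ (l <<< 8)) &&& 255 = h := by
  rw [Nat.and_xor_distrib_right]
  have h1 : h &&& 255 = h := by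
    have := Nat.and_two_pow_sub_one_eq_mod h 8
    norm_num at this; rw [this]; omega
  have h2 : (l <<< 8) &&& 255 = 0 := by
    have := Nat.and_two_pow_sub_one_eq_mod (l <<< 8) 8
    norm_num at this; rw [this, Nat.shiftLeft_eq]; simp [Nat.mul_mod_left]
  rw [h1, h2, Nat.xor_zero]

lemma high_byte (h l : Nat) (hh : h < 256) : (h ^^^ (l <<< 8)) >>> 8 = l := by
  rw [Nat.shiftRight_xor_distrib, Nat.shiftLeft_shiftRight]
  have : h >>> 8 = 0 := by rw [Nat.shiftRight_eq_div_pow]; omega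
  rw [this, Nat.zero_xor]

lemma or_split (h l : Nat) (hl : l < 256) : (h <<< 8) ||| l = h * 256 + l := by
  apply Nat.eq_of_testBit_eq
  intro j
  have h256 : h * 256 + l = 2 ^ 8 * h + l := by ring_nf
  rw [h256, Nat.testBit_two_pow_mul_add h (by omega) j]
  rw [Nat.testBit_or, Nat.testBit_shiftLeft]
  by_cases hj : j < 8
  · simp [hj, Nat.le_of_lt, show ¬ (8 ≤ j) by omega]
  · have hlj : l.testBit j = false := Nat.testBit_lt_two_pow (by
      calc l < 256 := hl
        _ = 2^8 := by norm_num
        _ ≤ 2^j := Nat.pow_le_pow_right (by norm_num) (by omega))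
    simp [hlj, show 8 ≤ j by omega, hj]

lemma byte_decomp (x : Nat) : (x &&& 255) ^^^ ((x >>> 8) <<< 8) = x := by
  apply Nat.eq_of_testBit_eq
  intro j
  rw [Nat.testBit_xor, Nat.testBit_and, Nat.testBit_shiftLeft, Nat.testBit_shiftRight]
  by_cases hj : j < 8
  · have h255 : Nat.testBit 255 j = true := by interval_cases j <;> decide
    simp [h255, show ¬ (8 ≤ j) by omega]
  · have h255 : Nat.testBit 255 j = false := Nat.testBit_lt_two_pow (by
      calc (255:Nat) < 2^8 := by norm_num
        _ ≤ 2^j := Nat.pow_le_pow_right (by norm_num) (by omega))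
    simp [h255, show 8 ≤ j by omega]

lemma xor_lt_256 {a b : Nat} (ha : a < 256) (hb : b < 256) : a ^^^ b < 256 :=
  Nat.xor_lt_two_pow (n := 8) (by omega) (by omega)

lemma bitStep_cast (c : Nat) : bitStep (c : Int) = ((bstepN c : Nat) : Int) := by
  have h1 : (1 : Int) = ((1 : Nat) : Int) := rfl
  have hM : (0xA001 : Int) = ((0xA001 : Nat) : Int) := rfl
  unfold bitStep bstepN
  have hsh : ((c : Int) >>> (1 : Nat)) = ((c >>> 1 : Nat) : Int) := rfl
  rw [h1, hM, PySem.Int.band_natCast, hsh, PySem.Int.bxor_natCast]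
  simp only [Nat.cast_inj]
  split_ifs <;> rfl

lemma step8_cast (c : Nat) :
    (List.range 8).foldl (fun c _ => bitStep c) (c : Int) = ((bstepN^[8] c : Nat) : Int) := by
  show bitStep (bitStep (bitStep (bitStep (bitStep (bitStep (bitStep (bitStep (c : Int)))))))) = _
  rw [bitStep_cast, bitStep_cast, bitStep_cast, bitStep_cast, bitStep_cast, bitStep_cast,
    bitStep_cast, bitStep_cast]
  rfl

-- the two lookup tables are exactly the low/high bytes of eight bit steps
set_option maxRecDepth 100000 in
lemma table_spec : ∀ i : Fin 256,
    (PySem.List.pyGet? crcHiTable ((i : Nat) : Int)).getD 0 = ((bstepN^[8] i &&& 255 : Nat) : Int) ∧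
    (PySem.List.pyGet? crcLoTable ((i : Nat) : Int)).getD 0 = ((bstepN^[8] i >>> 8 : Nat) : Int) ∧
    bstepN^[8] i < 65536 := by decide

lemma loops_eq (n : Nat) : ∀ (data : List Int) (size index : Int) (h l : Nat),
    h < 256 → l < 256 → 0 ≤ index →
    size ≤ (data.length : Int) →
    (∀ x ∈ data.take size.toNat, 0 ≤ x ∧ x < 256) →
    (size - index).toNat = n →
    calcCRC16Loop data size index (h : Int) (l : Int)
      = calcCRC16AltLoop data size index ((h ^^^ (l <<< 8) : Nat) : Int) := by
  induction n with
  | zero =>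
    intro data size index h l hh hl hidx hlen hbytes hn
    have hns : ¬ index < size := by omega
    rw [calcCRC16Loop, calcCRC16AltLoop]
    simp only [dif_neg hns]
    have e1 : PySem.Int.band ((h ^^^ l <<< 8 : Nat) : Int) 0xFF
        = (((h ^^^ l <<< 8) &&& 255 : Nat) : Int) := by
      rw [show (0xFF : Int) = ((255 : Nat) : Int) from rfl, PySem.Int.band_natCast]
    have e2 : (((h ^^^ l <<< 8 : Nat) : Int)) >>> (8 : Nat)
        = (((h ^^^ l <<< 8) >>> 8 : Nat) : Int) := rfl
    rw [e1, e2,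
      show ((((h ^^^ l <<< 8) &&& 255 : Nat) : Int)) <<< (8 : Nat)
        = ((((h ^^^ l <<< 8) &&& 255) <<< 8 : Nat) : Int) from rfl,
      PySem.Int.bor_natCast, low_byte h l hh, high_byte h l hh, or_split h l hl]
    push_cast; ring
  | succ n ih =>
    intro data size index h l hh hl hidx hlen hbytes hn
    have hlt : index < size := by omega
    have hjlen : index.toNat < data.length := by omega
    have hget : PySem.List.pyGet? data index = some data[index.toNat] := by
      rw [PySem.List.pyGet?_of_nonneg data hidx]
      exact List.getElem?_eq_getElem hjlen
    have hdmem : data[index.toNat] ∈ data.take size.toNat := by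
      have htl : index.toNat < (data.take size.toNat).length := by
        simp only [List.length_take]; omega
      have heq : (data.take size.toNat)[index.toNat]'htl = data[index.toNat] :=
        List.getElem_take (xs := data) (j := size.toNat) (i := index.toNat) (h := htl)
      exact heq ▸ List.getElem_mem htl
    obtain ⟨hd0, hd256⟩ := hbytes _ hdmem
    have hdb : data[index.toNat] = ((data[index.toNat].toNat : Nat) : Int) :=
      (Int.toNat_of_nonneg hd0).symm
    set b := data[index.toNat].toNat with hbdef
    have hblt : b < 256 := by omega
    have hi256 : h ^^^ b < 256 := xor_lt_256 hh hblt
    have hts := table_spec ⟨h ^^^ b, hi256⟩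
    obtain ⟨tH, tL, tB⟩ := hts
    set X := bstepN^[8] (h ^^^ b) with hXdef
    have hh' : l ^^^ (X &&& 255) < 256 :=
      xor_lt_256 hl (by have := Nat.and_le_right (n := X) (m := 255); omega)
    have hl' : X >>> 8 < 256 := by
      rw [Nat.shiftRight_eq_div_pow]; omega
    rw [calcCRC16Loop, calcCRC16AltLoop]
    simp only [dif_pos hlt, hget, hdb, Option.getD_some, PySem.Int.bxor_natCast]
    rw [tH, tL, PySem.Int.bxor_natCast, step8_cast]
    have key : bstepN^[8] ((h ^^^ l <<< 8) ^^^ b)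
        = (l ^^^ (X &&& 255)) ^^^ ((X >>> 8) <<< 8) := by
      have rearr : (h ^^^ l <<< 8) ^^^ b = (h ^^^ b) ^^^ (l <<< 8) := by
        rw [Nat.xor_assoc, Nat.xor_comm (l <<< 8) b, ← Nat.xor_assoc]
      rw [rearr, iter_bstepN_xor_shift 8 (h ^^^ b) l, ← hXdef]
      conv_lhs => rw [← byte_decomp X]
      simp [Nat.xor_comm, Nat.xor_left_comm]
    rw [key]
    exact ih data size (index + 1) _ _ hh' hl' (by omega) hlen hbytes (by omega)

-- ===== VERDICT (by name: the statement is the Claim_ definition above) =====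
theorem calcCRC16_spec : Claim_equal_calcCRC16 := by
  intro data size _dom hpre
  unfold Spec_calcCRC16 calcCRC16 calcCRC16_alt
  have h255 : ((255 : Nat) : Int) = 0xFF := rfl
  have hFFFF : (((255 ^^^ (255 <<< 8) : Nat) : Nat) : Int) = 0xFFFF := by decide
  rw [← h255, ← hFFFF]
  exact loops_eq (size - 0).toNat data size 0 255 255 (by omega) (by omega) le_rfl
    hpre.1 hpre.2 rfl
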